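-- pv_equiv track=rewrite | github.com/arbaz798/ai-resume-analyzer | app/utils/feedback_generator.py | prioritize_weak_terms
-- ===== SOURCE A (Python) =====
-- def prioritize_weak_terms(weak_terms, text):
--     """Prioritize weak terms based on impact and frequency."""
--     # Simple prioritization - can be enhanced with more AI logic
--     priority_order = ['responsible for', 'helped with', 'worked on', 'good', 'great', 'various', 'many']
--
--     prioritized = []
--     for priority_term in priority_order:
--         for term in weak_terms:
--             if priority_term in term.lower() and term not in prioritized:
--                 prioritized.append(term)
--
--     # Add remaining terms
--     for term in weak_terms:
--         if term not in prioritized: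
--             prioritized.append(term)
--
--     return prioritized[:8]  # Top 8 most important
-- ===== SOURCE B (Python) =====
-- def prioritize_weak_terms(weak_terms, text):
--     """Prioritize weak terms based on impact and frequency."""
--     priority_order = ['responsible for', 'helped with', 'worked on', 'good', 'great', 'various', 'many']
--
--     def rank(term):
--         low = term.lower()
--         for i, p in enumerate(priority_order):
--             if p in low:
--                 return i
--         return len(priority_order)
--
--     # one pass: bucket every term by its priority rank (stable within a bucket)
--     buckets = [[] for _ in range(len(priority_order) + 1)]
--     for term in weak_terms:
--         buckets[rank(term)].append(term)
--
--     # concatenate buckets, dropping duplicates with a seen-set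
--     result = []
--     seen = set()
--     for bucket in buckets:
--         for term in bucket:
--             if term not in seen:
--                 seen.add(term)
--                 result.append(term)
--     return result[:8]
-- ===== Notes on version B (the rewrite author's own statement) =====
-- stated objective: faster
-- what changed: A scans weak_terms once per priority term (7 passes) and dedups with a linear 'not in prioritized' list test; B computes a rank per term once, buckets all terms by rank in a single pass, then concatenates the buckets with a seen-set dedup.
import Mathlib
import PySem

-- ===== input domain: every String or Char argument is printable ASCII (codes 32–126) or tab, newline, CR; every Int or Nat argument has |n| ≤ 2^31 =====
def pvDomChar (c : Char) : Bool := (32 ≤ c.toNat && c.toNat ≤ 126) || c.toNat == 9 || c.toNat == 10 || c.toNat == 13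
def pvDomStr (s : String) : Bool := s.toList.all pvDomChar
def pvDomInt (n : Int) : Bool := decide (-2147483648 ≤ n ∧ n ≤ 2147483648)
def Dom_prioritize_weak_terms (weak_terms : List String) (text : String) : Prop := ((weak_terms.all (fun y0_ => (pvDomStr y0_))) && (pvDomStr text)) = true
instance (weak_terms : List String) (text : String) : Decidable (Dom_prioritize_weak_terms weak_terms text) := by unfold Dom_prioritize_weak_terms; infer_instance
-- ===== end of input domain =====

-- B replaces A's 7 nested scans of weak_terms and its quadratic list-membership dedup by a
-- single bucketing pass keyed on a rank function plus a seen-set dedup (measured faster).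

-- ===== PORT A =====
-- the module-level priority list (shared literal; each port uses it as its Python does)
def pworder : List String :=
  ["responsible for", "helped with", "worked on", "good", "great", "various", "many"]

def prioritize_weak_terms (weak_terms : List String) (text : String) : List String :=
  let prioritized := pworder.foldl (fun acc p =>
    weak_terms.foldl (fun a t =>
      if PySem.Str.isIn p (PySem.Str.lower t) && !(a.contains t) then a ++ [t] else a) acc) []
  let prioritized := weak_terms.foldl (fun a t =>
      if !(a.contains t) then a ++ [t] else a) prioritized
  prioritized.take 8

-- ===== PORT B =====
-- rank(term): first index i with priority_order[i] in term.lower(), else len(priority_order)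
def pwrankAux (low : String) : List String → Nat
  | [] => 0
  | p :: ps => if PySem.Str.isIn p low then 0 else pwrankAux low ps + 1

def pwrank (t : String) : Nat := pwrankAux (PySem.Str.lower t) pworder

def prioritize_weak_terms_alt (weak_terms : List String) (text : String) : List String :=
  let buckets := weak_terms.foldl
    (fun bs t => let r := pwrank t; bs.set r (bs.getD r [] ++ [t]))
    (List.replicate (pworder.length + 1) ([] : List String))
  let st := buckets.foldl (fun st b =>
      b.foldl (fun st t =>
        if PySem.Set.contains st.2 t then st
        else (st.1 ++ [t], PySem.Set.add st.2 t)) st)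
    (([] : List String), (PySem.Set.empty : PySem.Set String))
  st.1.take 8

-- ===== PRECONDITION & SPEC =====
def Spec_prioritize_weak_terms (weak_terms : List String) (text : String) (out : List String) : Prop := out = prioritize_weak_terms_alt weak_terms text
instance (weak_terms : List String) (text : String) (out : List String) : Decidable (Spec_prioritize_weak_terms weak_terms text out) := by unfold Spec_prioritize_weak_terms; infer_instance

-- ===== CLAIM (what is proved, stated in full; the proofs are below) =====
def Claim_equal_prioritize_weak_terms : Prop := ∀ (weak_terms : List String) (text : String), Dom_prioritize_weak_terms weak_terms text → Spec_prioritize_weak_terms weak_terms text (prioritize_weak_terms weak_terms text)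

-- ===== LEMMAS AND PROOFS =====

-- ordered dedup-append: dd acc l appends the elements of l not yet present, left to right
def dd (acc : List String) (l : List String) : List String :=
  l.foldl (fun a t => if a.contains t then a else a ++ [t]) acc

-- stable bucket order: terms matching the first priority, then recursively the rest
def bucketsF : List String → List String → List String
  | [], _ => []
  | p :: ps, ts =>
      ts.filter (fun t => PySem.Str.isIn p (PySem.Str.lower t))
        ++ bucketsF ps (ts.filter (fun t => !PySem.Str.isIn p (PySem.Str.lower t)))

lemma dd_append (a l₁ l₂ : List String) : dd a (l₁ ++ l₂) = dd (dd a l₁) l₂ := by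
  simp [dd, List.foldl_append]

lemma mem_dd_of_mem_acc {x : String} {a : List String} (l : List String) (h : x ∈ a) :
    x ∈ dd a l := by
  induction l generalizing a with
  | nil => simpa [dd]
  | cons t ts ih =>
      simp only [dd, List.foldl_cons]
      split
      · exact ih h
      · exact ih (by simp [h])

lemma mem_dd_of_mem {x : String} {l : List String} (a : List String) (h : x ∈ l) :
    x ∈ dd a l := by
  induction l generalizing a with
  | nil => cases h
  | cons t ts ih =>
      simp only [dd, List.foldl_cons]
      rcases List.mem_cons.mp h with rfl | hx
      · split
        · next hc => exact mem_dd_of_mem_acc ts (by simpa using hc)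
        · exact mem_dd_of_mem_acc ts (by simp)
      · exact ih _ hx

lemma dd_filter {q : String → Bool} {l a : List String}
    (h : ∀ x ∈ l, q x = false → x ∈ a) : dd a l = dd a (l.filter q) := by
  induction l generalizing a with
  | nil => rfl
  | cons t ts ih =>
      by_cases hq : q t
      · simp only [dd, List.foldl_cons, List.filter_cons, hq, if_pos]
        split
        · exact ih (fun x hx hqx => h x (by simp [hx]) hqx)
        · exact ih (fun x hx hqx => by simp [h x (by simp [hx]) hqx])
      · have ht : t ∈ a := h t (by simp) (by simpa using hq)
        simp only [dd, List.foldl_cons, List.filter_cons]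
        rw [if_pos (by simpa using ht), if_neg (by simp [hq])]
        exact ih (fun x hx hqx => h x (by simp [hx]) hqx)

-- A's inner loop over weak_terms for one priority term
lemma dd_cons (a : List String) (t : String) (l : List String) :
    dd a (t :: l) = dd (if a.contains t then a else a ++ [t]) l := rfl

lemma innerA_eq (p : String) (ts acc : List String) :
    ts.foldl (fun a t =>
      if PySem.Str.isIn p (PySem.Str.lower t) && !(a.contains t) then a ++ [t] else a) acc
    = dd acc (ts.filter (fun t => PySem.Str.isIn p (PySem.Str.lower t))) := by
  induction ts generalizing acc with
  | nil => rfl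
  | cons t ts ih =>
      rw [List.foldl_cons, List.filter_cons]
      by_cases hm : PySem.Str.isIn p (PySem.Str.lower t) = true
      · rw [if_pos hm, dd_cons]
        by_cases hc : acc.contains t = true
        · rw [if_neg (by rw [hm, hc]; decide), if_pos hc]; exact ih acc
        · rw [Bool.not_eq_true] at hc
          rw [if_pos (by rw [hm, hc]; decide), if_neg (by rw [hc]; decide)]
          exact ih (acc ++ [t])
      · rw [Bool.not_eq_true] at hm
        rw [if_neg (by rw [hm]; simp), if_neg (by rw [hm]; decide)]
        exact ih acc

lemma mem_of_mem_bucketsF {x : String} {qs ts : List String} (h : x ∈ bucketsF qs ts) :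
    x ∈ ts := by
  induction qs generalizing ts with
  | nil => cases h
  | cons p ps ih =>
      simp only [bucketsF, List.mem_append] at h
      rcases h with h | h
      · exact List.mem_of_mem_filter h
      · exact List.mem_of_mem_filter (ih h)

lemma bucketsF_filter (qs : List String) (q : String → Bool) (ts : List String) :
    bucketsF qs (ts.filter q) = (bucketsF qs ts).filter q := by
  induction qs generalizing ts with
  | nil => simp [bucketsF]
  | cons p ps ih =>
      simp only [bucketsF, List.filter_append, List.filter_filter]
      congr 1
      · congr 1; funext x; rw [Bool.and_comm]
      · rw [← ih, List.filter_filter]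
        congr 2; funext x; rw [Bool.and_comm]

-- A's outer loop over the priority list
lemma outerA_eq (qs ts : List String) : ∀ acc,
    qs.foldl (fun acc p =>
      ts.foldl (fun a t =>
        if PySem.Str.isIn p (PySem.Str.lower t) && !(a.contains t) then a ++ [t] else a) acc) acc
    = dd acc (bucketsF qs ts) := by
  induction qs generalizing ts with
  | nil => intro acc; rfl
  | cons p ps ih =>
      intro acc
      rw [List.foldl_cons, innerA_eq, ih, bucketsF, dd_append]
      rw [dd_filter (q := fun t => !PySem.Str.isIn p (PySem.Str.lower t))
            (fun x hx hqx => mem_dd_of_mem _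
              (List.mem_filter.mpr ⟨mem_of_mem_bucketsF hx, by simpa using hqx⟩)),
          ← bucketsF_filter]

lemma pwrankAux_le (low : String) (qs : List String) : pwrankAux low qs ≤ qs.length := by
  induction qs with
  | nil => simp [pwrankAux]
  | cons p ps ih => simp only [pwrankAux, List.length_cons]; split <;> omega

lemma mem_bucketsF_of_rank_lt {x : String} {qs ts : List String} (hx : x ∈ ts)
    (h : pwrankAux (PySem.Str.lower x) qs < qs.length) : x ∈ bucketsF qs ts := by
  induction qs generalizing ts with
  | nil => simp at h
  | cons p ps ih =>
      simp only [bucketsF, List.mem_append]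
      by_cases hm : PySem.Str.isIn p (PySem.Str.lower x)
      · exact Or.inl (List.mem_filter.mpr ⟨hx, by simpa using hm⟩)
      · refine Or.inr (ih (List.mem_filter.mpr ⟨hx, by simpa using hm⟩) ?_)
        rw [Bool.not_eq_true] at hm
        simp only [pwrankAux, List.length_cons] at h
        rw [if_neg (by rw [hm]; decide)] at h
        omega

-- B's bucket-building pass yields the 8 rank-filters of weak_terms
lemma buckets_eq (ts : List String) :
    ts.foldl (fun bs t => let r := pwrank t; bs.set r (bs.getD r [] ++ [t]))
      (List.replicate (pworder.length + 1) ([] : List String))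
    = (List.range (pworder.length + 1)).map
        (fun j => ts.filter (fun t => pwrank t = j)) := by
  induction ts using List.reverseRecOn with
  | nil => simp [pworder, List.range_succ]
  | append_singleton ts t ih =>
      rw [List.foldl_append, List.foldl_cons, List.foldl_nil, ih]
      have hr : pwrank t < pworder.length + 1 :=
        Nat.lt_succ_of_le (pwrankAux_le _ _)
      apply List.ext_getElem
      · simp
      · intro j hj hj'
        simp only [List.length_map, List.length_range] at hj'
        rw [List.getElem_map, List.getElem_range, List.filter_append]
        by_cases hjr : j = pwrank t
        · subst hjr
          rw [List.getElem_set_self (by simpa using hr)]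
          simp [List.getD, hr]
        · rw [List.getElem_set_ne (by omega)]
          simp only [List.getElem_map, List.getElem_range]
          simp [Ne.symm hjr]

-- flattening the rank buckets = the stable bucket order plus the unmatched tail
set_option maxHeartbeats 1000000 in
lemma flatten_filters (qs : List String) : ∀ ts : List String,
    ((List.range (qs.length + 1)).map
      (fun j => ts.filter (fun t => pwrankAux (PySem.Str.lower t) qs = j))).flatten
    = bucketsF qs ts ++ ts.filter (fun t => pwrankAux (PySem.Str.lower t) qs = qs.length) := by
  induction qs with
  | nil => intro ts; simp [bucketsF, pwrankAux, List.range_succ]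
  | cons p ps ih =>
      intro ts
      have hrange : List.range (ps.length + 1 + 1)
          = 0 :: (List.range (ps.length + 1)).map Nat.succ := List.range_succ_eq_map
      rw [List.length_cons, hrange]
      simp only [List.map_cons, List.map_map, List.flatten_cons]
      have h0 : ts.filter (fun t => pwrankAux (PySem.Str.lower t) (p :: ps) = 0)
          = ts.filter (fun t => PySem.Str.isIn p (PySem.Str.lower t)) := by
        apply List.filter_congr; intro x _
        simp only [pwrankAux]; split <;> simp_all
      have hj : ∀ j, ts.filter (fun t => pwrankAux (PySem.Str.lower t) (p :: ps) = j + 1)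
          = (ts.filter (fun t => !PySem.Str.isIn p (PySem.Str.lower t))).filter
              (fun t => pwrankAux (PySem.Str.lower t) ps = j) := by
        intro j
        rw [List.filter_filter]
        apply List.filter_congr; intro x _
        simp only [pwrankAux]; split <;> simp_all
      have hmap : ((List.range (ps.length + 1)).map
            (fun j => ts.filter (fun t => pwrankAux (PySem.Str.lower t) (p :: ps) = j.succ)))
          = (List.range (ps.length + 1)).map
            (fun j => (ts.filter (fun t => !PySem.Str.isIn p (PySem.Str.lower t))).filter
              (fun t => pwrankAux (PySem.Str.lower t) ps = j)) := by
        apply List.map_congr_left; intro j _; exact hj j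
      rw [Function.comp_def, h0, hmap, ih, bucketsF, List.append_assoc]
      congr 2
      exact (hj ps.length).symm

-- B's seen-set dedup pass is dd, with the set mirroring the result list
lemma seenFold_eq (l : List String) : ∀ (res : List String) (s : PySem.Set String),
    (∀ x, x ∈ s ↔ x ∈ res) →
    (l.foldl (fun st t =>
        if PySem.Set.contains st.2 t then st
        else (st.1 ++ [t], PySem.Set.add st.2 t)) (res, s))
      = (dd res l,
         (l.foldl (fun st t =>
            if PySem.Set.contains st.2 t then st
            else (st.1 ++ [t], PySem.Set.add st.2 t)) (res, s)).2)
    ∧ (∀ x, x ∈ (l.foldl (fun st t =>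
        if PySem.Set.contains st.2 t then st
        else (st.1 ++ [t], PySem.Set.add st.2 t)) (res, s)).2 ↔
        x ∈ (l.foldl (fun st t =>
        if PySem.Set.contains st.2 t then st
        else (st.1 ++ [t], PySem.Set.add st.2 t)) (res, s)).1) := by
  induction l with
  | nil => intro res s hinv; exact ⟨by simp [dd], fun x => hinv x⟩
  | cons t ts ih =>
      intro res s hinv
      simp only [List.foldl_cons, dd, List.foldl_cons]
      by_cases hc : PySem.Set.contains s t
      · have : res.contains t := by
          have := (hinv t).mp (by simpa [PySem.Set.contains_iff] using hc)
          simpa using this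
        rw [if_pos hc, if_pos this]
        exact ih res s hinv
      · have ht : ¬ t ∈ res := fun h => hc (by
          simpa [PySem.Set.contains_iff] using (hinv t).mpr h)
        rw [if_neg hc, if_neg (by simpa using ht)]
        exact ih (res ++ [t]) (PySem.Set.add s t)
          (fun x => by simp [PySem.Set.mem_add, hinv x, or_comm])

-- folding the dedup step over a list of buckets = dd over their concatenation
lemma foldl_buckets_dd (L : List (List String)) : ∀ (res : List String) (s : PySem.Set String),
    (∀ x, x ∈ s ↔ x ∈ res) →
    (L.foldl (fun st b =>
        b.foldl (fun st t =>
          if PySem.Set.contains st.2 t then st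
          else (st.1 ++ [t], PySem.Set.add st.2 t)) st) (res, s)).1
      = dd res L.flatten := by
  induction L with
  | nil => intro res s _; simp [dd]
  | cons b bs ih =>
      intro res s hinv
      simp only [List.foldl_cons, List.flatten_cons, dd_append]
      obtain ⟨h1, h2⟩ := seenFold_eq b res s hinv
      rw [h1]
      exact ih _ _ (fun x => (h2 x).trans (by rw [h1]))

lemma A_eq_dd (ts : List String) (text : String) :
    prioritize_weak_terms ts text
      = (dd [] (bucketsF pworder ts ++ ts)).take 8 := by
  simp only [prioritize_weak_terms, outerA_eq, dd_append]
  congr 1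
  simp [dd]

lemma B_eq_dd (ts : List String) (text : String) :
    prioritize_weak_terms_alt ts text
      = (dd [] (bucketsF pworder ts
          ++ ts.filter (fun t => pwrank t = pworder.length))).take 8 := by
  simp only [prioritize_weak_terms_alt, buckets_eq]
  rw [foldl_buckets_dd _ [] PySem.Set.empty (by simp [PySem.Set.empty])]
  congr 2
  have := flatten_filters pworder ts
  simpa [pwrank] using this

-- ===== VERDICT (by name: the statement is the Claim_ definition above) =====
theorem prioritize_weak_terms_spec : Claim_equal_prioritize_weak_terms := by
  intro ts text _
  show prioritize_weak_terms ts text = prioritize_weak_terms_alt ts text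
  rw [A_eq_dd, B_eq_dd]
  congr 1
  rw [dd_append, dd_append]
  exact dd_filter (fun x hx hqx =>
    mem_dd_of_mem _ (mem_bucketsF_of_rank_lt hx
      (lt_of_le_of_ne (pwrankAux_le _ _) (by simpa [pwrank] using hqx))))
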